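-- pv_equiv track=rewrite | github.com/Sage-Bionetworks/schematic | schematic/utils/schema_utils.py | check_if_display_name_is_valid_label
-- ===== SOURCE A (Python) =====
-- from typing import Literal, Union, Optional
--
-- BLACKLISTED_CHARS = ["(", ")", ".", " ", "-"]
--
-- def check_if_display_name_is_valid_label(
--     display_name: str,
--     blacklisted_chars: Optional[list[str]] = None,
-- ) -> bool:
--     """Check if the display name can be used as a display label
--
--     Args:
--         display_name (str): node display name
--         blacklisted_chars (Optional[list[str]], optional):
--           characters that are not permitted for synapse annotations uploads.
--           Defaults to None.
--
--     Returns: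
--         bool: True, if the display name can be used as a label, False, if it cannot.
--     """
--     if blacklisted_chars is None:
--         blacklisted_chars = BLACKLISTED_CHARS
--     valid_label = not any(char in display_name for char in blacklisted_chars)
--     return valid_label
-- ===== SOURCE B (Python) =====
-- BLACKLISTED_CHARS = ["(", ")", ".", " ", "-"]
--
-- def check_if_display_name_is_valid_label(display_name, blacklisted_chars=None):
--     banned = BLACKLISTED_CHARS if blacklisted_chars is None else blacklisted_chars
--     i = 0
--     n = len(display_name)
--     while i < n:
--         if any(display_name.startswith(b, i) for b in banned):
--             return False
--         i += 1
--     return True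
-- ===== Notes on version B (the rewrite author's own statement) =====
-- stated objective: alternative
-- what changed: Instead of running one full substring search per blacklisted string, B walks the character positions of display_name once and returns False at the first position where some blacklisted string starts; Pre_ excludes the empty display_name with an explicit blacklist containing the empty string, where A's False rests on Python's rule that the empty string counts as a substring of the empty string, while B's True is equally defensible.
-- outside the precondition, e.g. on check_if_display_name_is_valid_label('', ['']): A returns False, B returns True
import Mathlib
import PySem

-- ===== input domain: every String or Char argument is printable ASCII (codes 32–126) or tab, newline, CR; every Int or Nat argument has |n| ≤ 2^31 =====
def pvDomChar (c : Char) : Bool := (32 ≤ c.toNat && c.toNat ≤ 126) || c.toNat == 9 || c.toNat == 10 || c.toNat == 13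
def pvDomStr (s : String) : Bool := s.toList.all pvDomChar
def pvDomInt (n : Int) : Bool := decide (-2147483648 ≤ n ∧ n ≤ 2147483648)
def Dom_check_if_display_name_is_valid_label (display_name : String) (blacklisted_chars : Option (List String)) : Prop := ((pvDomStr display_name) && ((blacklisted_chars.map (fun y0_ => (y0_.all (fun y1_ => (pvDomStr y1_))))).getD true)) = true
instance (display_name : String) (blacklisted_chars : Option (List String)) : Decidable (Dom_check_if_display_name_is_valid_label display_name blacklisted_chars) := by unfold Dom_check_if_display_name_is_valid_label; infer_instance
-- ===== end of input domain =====

-- B walks the suffixes of display_name once, stopping at the first blacklisted prefix; A searches per blacklisted string. Return-value equivalence on Pre_.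
-- ===== PORT A =====
def pvBLACKLISTED_CHARS : List String := ["(", ")", ".", " ", "-"]

def check_if_display_name_is_valid_label (display_name : String) (blacklisted_chars : Option (List String)) : Bool :=
  let bl := blacklisted_chars.getD pvBLACKLISTED_CHARS
  let valid_label := !(bl.any (fun char => PySem.Str.isIn char display_name))
  valid_label

-- ===== PORT B =====
-- the position loop of Source B: recursion on the suffix starting at position i (drop i ↔ startswith(b, i))
def pvScanSuffixes (banned : List String) : List Char → Bool
  | [] => true
  | c :: rest =>
    if banned.any (fun b => PySem.Chars.startswith (c :: rest) b.toList) then false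
    else pvScanSuffixes banned rest

def check_if_display_name_is_valid_label_alt (display_name : String) (blacklisted_chars : Option (List String)) : Bool :=
  let banned := blacklisted_chars.getD pvBLACKLISTED_CHARS
  pvScanSuffixes banned display_name.toList

-- ===== PRECONDITION & SPEC =====
-- Pre_ excludes only the empty display_name with an explicit blacklist containing the empty string:
-- there A's False comes from Python's rule that the empty string counts as a substring of the
-- empty string, while B's True (no character
-- position carries the pattern) is an equally defensible reading of this unspecified corner.
def Pre_check_if_display_name_is_valid_label (display_name : String) (blacklisted_chars : Option (List String)) : Prop :=
  ¬ (display_name = "" ∧ ∃ l, blacklisted_chars = some l ∧ "" ∈ l)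
instance (display_name : String) (blacklisted_chars : Option (List String)) : Decidable (Pre_check_if_display_name_is_valid_label display_name blacklisted_chars) := by unfold Pre_check_if_display_name_is_valid_label; infer_instance

def pvWitness_check_if_display_name_is_valid_label : String × Option (List String) := ("a-b", none)

def Spec_check_if_display_name_is_valid_label (display_name : String) (blacklisted_chars : Option (List String)) (out : Bool) : Prop := out = check_if_display_name_is_valid_label_alt display_name blacklisted_chars
instance (display_name : String) (blacklisted_chars : Option (List String)) (out : Bool) : Decidable (Spec_check_if_display_name_is_valid_label display_name blacklisted_chars out) := by unfold Spec_check_if_display_name_is_valid_label; infer_instance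

-- ===== CLAIM (what is proved, stated in full; the proofs are below) =====
def Claim_equal_check_if_display_name_is_valid_label : Prop := ∀ (display_name : String) (blacklisted_chars : Option (List String)), Dom_check_if_display_name_is_valid_label display_name blacklisted_chars → Pre_check_if_display_name_is_valid_label display_name blacklisted_chars → Spec_check_if_display_name_is_valid_label display_name blacklisted_chars (check_if_display_name_is_valid_label display_name blacklisted_chars)

-- ===== LEMMAS AND PROOFS =====

-- When every banned string is nonempty, the suffix scan agrees with per-pattern substring search on every suffix.
theorem pv_scan_nonempty (bl : List String) (h : ∀ p ∈ bl, p.toList ≠ []) :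
    ∀ s : List Char, pvScanSuffixes bl s = !(bl.any (fun p => PySem.Chars.isIn p.toList s)) := by
  intro s
  induction s with
  | nil =>
    simp only [pvScanSuffixes]
    symm
    simp only [Bool.not_eq_true', List.any_eq_false]
    intro p hp
    simp only [Bool.not_eq_true, PySem.Chars.isIn_eq_false_iff]
    intro hinf
    exact h p hp (List.eq_nil_of_infix_nil hinf)
  | cons c rest ih =>
    simp only [pvScanSuffixes]
    by_cases hc : bl.any (fun b => PySem.Chars.startswith (c :: rest) b.toList) = true
    · rw [if_pos hc]
      symm
      simp only [Bool.not_eq_false', List.any_eq_true] at hc ⊢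
      obtain ⟨b, hb, hsw⟩ := hc
      exact ⟨b, hb, (PySem.Chars.isIn_iff_infix _ _).mpr ((PySem.Chars.startswith_iff _ _).mp hsw).isInfix⟩
    · rw [if_neg hc, ih]
      congr 1
      simp only [List.any_eq_true] at hc
      push Not at hc
      rw [Bool.eq_iff_iff]
      simp only [List.any_eq_true]
      constructor
      · rintro ⟨p, hp, hin⟩
        exact ⟨p, hp, (PySem.Chars.isIn_iff_infix _ _).mpr
          (List.infix_cons_iff.mpr (Or.inr ((PySem.Chars.isIn_iff_infix _ _).mp hin)))⟩
      · rintro ⟨p, hp, hin⟩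
        refine ⟨p, hp, (PySem.Chars.isIn_iff_infix _ _).mpr ?_⟩
        rcases List.infix_cons_iff.mp ((PySem.Chars.isIn_iff_infix _ _).mp hin) with hpre | hinf
        · exact absurd ((PySem.Chars.startswith_iff _ _).mpr hpre) (hc p hp)
        · exact hinf

theorem pv_main (display_name : String) (blacklisted_chars : Option (List String))
    (hpre : Pre_check_if_display_name_is_valid_label display_name blacklisted_chars) :
    check_if_display_name_is_valid_label display_name blacklisted_chars
      = check_if_display_name_is_valid_label_alt display_name blacklisted_chars := by
  unfold check_if_display_name_is_valid_label check_if_display_name_is_valid_label_alt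
  dsimp only
  set bl := blacklisted_chars.getD pvBLACKLISTED_CHARS with hbl
  by_cases hne : ∀ p ∈ bl, p.toList ≠ []
  · rw [pv_scan_nonempty bl hne display_name.toList]
    simp only [PySem.Str.isIn_eq]
  · push Not at hne
    obtain ⟨p, hp, hpnil⟩ := hne
    have hpe : p = "" := String.toList_eq_nil_iff.mp hpnil
    subst hpe
    -- the blacklist explicitly contains ""; Pre_ forces display_name ≠ ""
    have hbc : ∃ l, blacklisted_chars = some l ∧ "" ∈ l := by
      cases blacklisted_chars with
      | none => simp [hbl, pvBLACKLISTED_CHARS] at hp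
      | some l => exact ⟨l, rfl, by simpa [hbl] using hp⟩
    have hd : display_name ≠ "" := fun h => hpre ⟨h, hbc⟩
    have hs : display_name.toList ≠ [] := fun h => hd (String.toList_eq_nil_iff.mp h)
    cases hsl : display_name.toList with
    | nil => exact absurd hsl hs
    | cons c rest =>
      rw [pvScanSuffixes]
      rw [if_pos (List.any_eq_true.mpr ⟨"", hp, by
        rw [PySem.Chars.startswith_iff]; simp⟩)]
      simp only [Bool.not_eq_false', List.any_eq_true]
      exact ⟨"", hp, by rw [PySem.Str.isIn_eq, PySem.Chars.isIn_iff_infix]; simp⟩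

-- ===== VERDICT (by name: the statement is the Claim_ definition above) =====
theorem check_if_display_name_is_valid_label_spec : Claim_equal_check_if_display_name_is_valid_label := by
  intro d bc _ hpre
  exact pv_main d bc hpre
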